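-- pv_equiv track=rewrite | github.com/bellyfat/Arbitrage-Alphas | simple_arbitrage_polygon/src/arbitrage.py | get_next_index
-- ===== SOURCE A (Python) =====
-- def get_next_index(i, path):
--     a= []
--     r = 1
--     while r < len(path):
--
--         try:
--             w = path.index(i, path.index(i)+r)
--             a.append(w)
--             r+=w
--         except:
--             break
--     return a
-- ===== SOURCE B (Python) =====
-- def get_next_index(i, path):
--     # One pass: precompute the positions of i once, then walk them with a
--     # monotone pointer instead of re-scanning the list with .index each round.
--     n = len(path)
--     ps = [j for j, x in enumerate(path) if x == i]
--     if not ps: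
--         return []
--     first = ps[0]
--     a = []
--     r = 1
--     t = 0
--     m = len(ps)
--     while r < n:
--         start = first + r
--         while t < m and ps[t] < start:
--             t += 1
--         if t == m:
--             break
--         w = ps[t]
--         a.append(w)
--         r += w
--     return a
-- ===== Notes on version B (the rewrite author's own statement) =====
-- stated objective: alternative
-- what changed: B precomputes the list of positions of i in one enumerate pass and walks it with a monotone pointer, instead of A's repeated list.index scans (and re-finding the first occurrence every iteration) inside a try/except loop.
import Mathlib
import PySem

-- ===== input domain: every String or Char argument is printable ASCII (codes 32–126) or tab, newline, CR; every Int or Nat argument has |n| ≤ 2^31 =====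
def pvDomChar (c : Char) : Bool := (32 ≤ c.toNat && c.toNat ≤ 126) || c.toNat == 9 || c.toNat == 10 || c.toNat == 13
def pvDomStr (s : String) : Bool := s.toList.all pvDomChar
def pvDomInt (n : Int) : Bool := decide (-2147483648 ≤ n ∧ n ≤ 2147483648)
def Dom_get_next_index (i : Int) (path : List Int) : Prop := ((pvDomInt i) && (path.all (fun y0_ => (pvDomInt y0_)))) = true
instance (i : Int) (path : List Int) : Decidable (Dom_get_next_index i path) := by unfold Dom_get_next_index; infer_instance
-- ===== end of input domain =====

-- B replaces A's repeated list.index scans by one precomputed position list walked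
-- with a monotone pointer (alternative decomposition; no speed claim).

-- ===== PORT A =====
-- A's while loop, fuel = len(path) (r starts at 1 and strictly grows each round, so
-- the loop runs at most len(path) times; fuel is never exhausted while the guard holds).
-- path.index(i, start) for start ≥ 0 is ported exactly as index? on the dropped suffix
-- plus the offset (Python raises ValueError = none when no occurrence ≥ start).
def gniLoopA (i : Int) (path : List Int) (fuel : Nat) (r : Int) (a : List Int) : List Int :=
  match fuel with
  | 0 => a
  | Nat.succ fuel =>
    if r < (path.length : Int) then
      match PySem.List.index? path i with
      | none => a                                   -- except: break
      | some p0 =>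
        match PySem.List.index? (path.drop ((p0 : Int) + r).toNat) i with
        | none => a                                 -- except: break
        | some w' =>
          gniLoopA i path fuel (r + ((w' : Int) + ((p0 : Int) + r))) (a ++ [(w' : Int) + ((p0 : Int) + r)])
    else a

def get_next_index (i : Int) (path : List Int) : List Int :=
  gniLoopA i path path.length 1 []

-- ===== PORT B =====
-- positions of i in path (the enumerate comprehension in Source B)
def gniPos (i : Int) (path : List Int) : List Int :=
  ((PySem.List.enumerate path).filter (fun p => p.2 == i)).map (fun p => p.1)

-- B's while loop; the monotone pointer t into ps is carried as the suffix ps[t:]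
def gniLoopB (n first : Int) (fuel : Nat) (q : List Int) (r : Int) (acc : List Int) : List Int :=
  match fuel with
  | 0 => acc
  | Nat.succ fuel =>
    match q.dropWhile (fun p => decide (p < first + r)) with
    | [] => if r < n then acc else acc
    | w :: rest => if r < n then gniLoopB n first fuel (w :: rest) (r + w) (acc ++ [w]) else acc

def get_next_index_alt (i : Int) (path : List Int) : List Int :=
  match gniPos i path with
  | [] => []
  | first :: rest => gniLoopB (path.length : Int) first path.length (first :: rest) 1 []

-- ===== PRECONDITION & SPEC =====
def Spec_get_next_index (i : Int) (path : List Int) (out : List Int) : Prop := out = get_next_index_alt i path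
instance (i : Int) (path : List Int) (out : List Int) : Decidable (Spec_get_next_index i path out) := by unfold Spec_get_next_index; infer_instance

-- ===== CLAIM (what is proved, stated in full; the proofs are below) =====
def Claim_equal_get_next_index : Prop := ∀ (i : Int) (path : List Int), Dom_get_next_index i path → Spec_get_next_index i path (get_next_index i path)

-- ===== LEMMAS AND PROOFS =====

-- proof-side view of gniPos: positions of i, with running start s
def psF (i : Int) : Int → List Int → List Int
  | _, [] => []
  | s, x :: t => if x == i then s :: psF i (s+1) t else psF i (s+1) t

lemma psF_eq_enum (i : Int) (xs : List Int) : ∀ s : Int,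
    ((PySem.List.enumerate xs s).filter (fun p => p.2 == i)).map (fun p => p.1) = psF i s xs := by
  induction xs with
  | nil => intro s; simp [PySem.List.enumerate_nil, psF]
  | cons x t ih =>
    intro s
    by_cases hx : x = i <;>
      simp [PySem.List.enumerate_cons, psF, hx, ih (s+1)]

lemma gniPos_eq (i : Int) (xs : List Int) : gniPos i xs = psF i 0 xs :=
  psF_eq_enum i xs 0

lemma psF_ge (i : Int) (xs : List Int) : ∀ (s p : Int), p ∈ psF i s xs → s ≤ p := by
  induction xs with
  | nil => intro s p hp; simp [psF] at hp
  | cons x t ih =>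
    intro s p hp
    by_cases hx : x = i <;> simp [psF, hx] at hp
    · rcases hp with rfl | hp
      · omega
      · have := ih (s+1) p hp; omega
    · have := ih (s+1) p hp; omega

lemma dw_ge (l : List Int) (c : Int) (h : ∀ x ∈ l, c ≤ x) :
    l.dropWhile (fun p => decide (p < c)) = l := by
  cases l with
  | nil => rfl
  | cons x t =>
    have : ¬ x < c := by have := h x (by simp); omega
    simp [List.dropWhile_cons, this]

lemma dw_dw (l : List Int) (c d : Int) (h : c ≤ d) :
    (l.dropWhile (fun p => decide (p < c))).dropWhile (fun p => decide (p < d)) =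
      l.dropWhile (fun p => decide (p < d)) := by
  induction l with
  | nil => rfl
  | cons x t ih =>
    by_cases hx : x < c
    · have : x < d := by omega
      simp [List.dropWhile_cons, hx, this, ih]
    · simp [List.dropWhile_cons, hx]

-- the key bridge: list.index(i, k) on path vs head of the position list past k
lemma idx_bridge (i : Int) (xs : List Int) : ∀ (s : Int) (k : Nat),
    (PySem.List.index? (xs.drop k) i).map (fun (w' : Nat) => s + (k : Int) + (w' : Int)) =
      ((psF i s xs).dropWhile (fun p => decide (p < s + (k : Int)))).head? := by
  induction xs with
  | nil => intro s k; simp [PySem.List.index?, psF]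
  | cons x t ih =>
    intro s k
    cases k with
    | zero =>
      simp only [List.drop_zero, Nat.cast_zero, add_zero]
      by_cases hx : x = i
      · have hx' : (x == i) = true := by simp [hx]
        have hs : ¬ (s < s) := lt_irrefl s
        simp [PySem.List.index?, List.idxOf?_cons, hx', psF, hx, List.dropWhile_cons, hs]
      · have hpsf : psF i s (x :: t) = psF i (s+1) t := by simp [psF, hx]
        have h0 : (psF i s (x :: t)).dropWhile (fun p => decide (p < s)) = psF i (s+1) t := by
          rw [hpsf]
          exact dw_ge _ _ (fun y hy => by have := psF_ge i t (s+1) y hy; omega)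
        have h1 := ih (s+1) 0
        simp only [List.drop_zero, Nat.cast_zero, add_zero] at h1
        rw [dw_ge _ _ (fun y hy => psF_ge i t (s+1) y hy)] at h1
        rw [h0, ← h1]
        have hx' : (x == i) = false := by simp [hx]
        simp only [PySem.List.index?, List.idxOf?_cons, hx']
        cases hidx : List.idxOf? i t <;> simp [hidx] <;> push_cast <;> omega
    | succ k =>
      have hth : s + ((k+1 : Nat) : Int) = (s+1) + (k : Int) := by push_cast; omega
      have h1 := ih (s+1) k
      by_cases hx : x = i
      · have hpsf : psF i s (x :: t) = s :: psF i (s+1) t := by simp [psF, hx]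
        rw [hpsf]
        simp only [List.dropWhile_cons, List.drop_succ_cons, hth]
        rw [if_pos (show decide (s < s + 1 + (k : Int)) = true by
          simp only [decide_eq_true_eq]; omega)]
        exact h1
      · have hpsf : psF i s (x :: t) = psF i (s+1) t := by simp [psF, hx]
        rw [hpsf]
        simp only [List.drop_succ_cons, hth]
        exact h1

lemma loopA_none (i : Int) (path : List Int) (fuel : Nat) (r : Int) (a : List Int)
    (h : PySem.List.index? path i = none) : gniLoopA i path fuel r a = a := by
  cases fuel with
  | zero => rfl
  | succ n =>
    simp only [gniLoopA, h]
    split <;> rfl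

lemma loop_eq (i : Int) (path : List Int) (p0 : Nat)
    (hidx : PySem.List.index? path i = some p0) :
    ∀ (fuel : Nat) (r : Int), 1 ≤ r → ∀ (s0 : Int) (acc : List Int), s0 ≤ (p0 : Int) + r →
    gniLoopA i path fuel r acc =
      gniLoopB (path.length : Int) (p0 : Int) fuel
        ((psF i 0 path).dropWhile (fun p => decide (p < s0))) r acc := by
  intro fuel
  induction fuel with
  | zero => intro r _ s0 acc _; rfl
  | succ n ih =>
    intro r hr s0 acc hs0
    have hp0 : (0 : Int) ≤ (p0 : Int) := Int.natCast_nonneg p0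
    have hs : (0 : Int) ≤ (p0 : Int) + r := by omega
    -- B's dropWhile from the carried suffix equals dropWhile from the full list
    have hq : (((psF i 0 path).dropWhile (fun p => decide (p < s0))).dropWhile
          (fun p => decide (p < (p0 : Int) + r))) =
        (psF i 0 path).dropWhile (fun p => decide (p < (p0 : Int) + r)) :=
      dw_dw _ _ _ hs0
    have hbr := idx_bridge i path 0 ((p0 : Int) + r).toNat
    rw [Int.toNat_of_nonneg hs] at hbr
    simp only [zero_add] at hbr
    cases hfind : PySem.List.index? (path.drop ((p0 : Int) + r).toNat) i with
    | none =>
      rw [hfind] at hbr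
      simp only [Option.map_none] at hbr
      have hnil : (psF i 0 path).dropWhile (fun p => decide (p < (p0 : Int) + r)) = [] :=
        List.head?_eq_none_iff.mp hbr.symm
      simp only [gniLoopA, gniLoopB, hidx, hfind, hq, hnil]
    | some w' =>
      rw [hfind] at hbr
      simp only [Option.map_some] at hbr
      cases hdw : (psF i 0 path).dropWhile (fun p => decide (p < (p0 : Int) + r)) with
      | nil => rw [hdw] at hbr; simp at hbr
      | cons w rest =>
        rw [hdw] at hbr
        simp only [List.head?_cons, Option.some.injEq] at hbr
        -- hbr : ↑p0 + r + ↑w' = w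
        simp only [gniLoopA, gniLoopB, hidx, hfind, hq, hdw]
        split
        · have e1 : (w' : Int) + ((p0 : Int) + r) = w := by omega
          rw [e1]
          have := ih (r + w) (by omega) ((p0 : Int) + r) (acc ++ [w]) (by omega)
          rw [this, ← hdw]
        · rfl

lemma B_of_none (i : Int) (path : List Int)
    (h : PySem.List.index? path i = none) : get_next_index_alt i path = [] := by
  have hbr := idx_bridge i path 0 0
  simp only [List.drop_zero, h, Option.map_none] at hbr
  have hdw := dw_ge (psF i 0 path) 0 (fun y hy => psF_ge i path 0 y hy)
  have hz : ((0:Nat) : Int) = 0 := rfl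
  rw [show (0 : Int) + ((0:Nat) : Int) = 0 by norm_num, hdw] at hbr
  have hnil : psF i 0 path = [] := List.head?_eq_none_iff.mp hbr.symm
  unfold get_next_index_alt
  rw [gniPos_eq, hnil]

-- ===== VERDICT (by name: the statement is the Claim_ definition above) =====
theorem get_next_index_spec : Claim_equal_get_next_index := by
  intro i path _
  unfold Spec_get_next_index get_next_index
  cases hidx : PySem.List.index? path i with
  | none =>
    rw [loopA_none i path _ _ _ hidx, B_of_none i path hidx]
  | some p0 =>
    have hbr := idx_bridge i path 0 0
    simp only [List.drop_zero, hidx, Option.map_some] at hbr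
    have hdw := dw_ge (psF i 0 path) 0 (fun y hy => psF_ge i path 0 y hy)
    rw [show (0 : Int) + ((0:Nat) : Int) = 0 by norm_num, hdw] at hbr
    cases hps : psF i 0 path with
    | nil => rw [hps] at hbr; simp at hbr
    | cons first rest =>
      rw [hps] at hbr
      simp only [List.head?_cons, Option.some.injEq] at hbr
      -- hbr : 0 + 0 + ↑p0 = first
      have hfirst : first = (p0 : Int) := by omega
      unfold get_next_index_alt
      rw [gniPos_eq, hps, hfirst]
      have h0 : (first :: rest).dropWhile (fun p => decide (p < (0:Int))) = first :: rest := by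
        apply dw_ge
        intro y hy
        rw [← hps] at hy
        exact psF_ge i path 0 y hy
      have := loop_eq i path p0 hidx path.length 1 (by norm_num) 0 [] (by omega)
      rw [hps, h0, hfirst] at this
      exact this
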